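-- pv_equiv track=rewrite | github.com/Ziaad03/ngram-language-model-sentiment-classification | N-gram/model.py | build_ngram_counts
-- ===== SOURCE A (Python) =====
-- from collections import defaultdict, Counter
--
-- def pad_sentence(tokens, n):
--     """
--     Pads a list of tokens with <s> at the start (n-1 times)
--     and </s> at the end (once).
--     For example, if n=3, you add 2 <s> tokens at the start.
--     """
--     padded = ["<s>"] * (n - 1) + tokens + ["</s>"]
--     return padded
--
-- def build_ngram_counts(tokenized_sentences, n):
--     """
--     Builds n-gram counts and (n-1)-gram counts from the given tokenized sentences.
--     Each sentence is padded with <s> and </s>.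
--
--     Args:
--         tokenized_sentences: list of lists, where each sub-list is a tokenized sentence.
--         n: the order of the n-gram (e.g., 2 for bigrams, 3 for trigrams).
--
--     Returns:
--         ngram_counts: Counter of n-grams (tuples of length n).
--         context_counts: Counter of (n-1)-gram contexts.
--     """
--     ngram_counts = Counter()
--     context_counts = Counter()
--
--     for sentence in tokenized_sentences:
--         padded_sentence = pad_sentence(sentence, n)
--         for i in range(len(padded_sentence) - n + 1):
--             ngram = tuple(padded_sentence[i : i + n])
--             context = tuple(padded_sentence[i : i + n - 1])
--             ngram_counts[ngram] += 1
--             context_counts[context] += 1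
--
--     return ngram_counts, context_counts
-- ===== SOURCE B (Python) =====
-- from collections import Counter
--
-- def pad_sentence(tokens, n):
--     padded = ["<s>"] * (n - 1) + tokens + ["</s>"]
--     return padded
--
-- def build_ngram_counts(tokenized_sentences, n):
--     # Staged pipeline: materialise the flat stream of n-gram windows, count it
--     # with one Counter(iterable) call, then derive context_counts by summing
--     # the n-gram counts over their (n-1)-prefix (each window increment in A
--     # co-increments its prefix context, so prefix sums reproduce it exactly).
--     windows = (tuple(p[i : i + n])
--                for p in (pad_sentence(s, n) for s in tokenized_sentences)
--                for i in range(len(p) - n + 1))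
--     ngram_counts = Counter(windows)
--     context_counts = Counter()
--     for ng, cnt in ngram_counts.items():
--         context_counts[ng[:-1]] += cnt
--     return ngram_counts, context_counts
-- ===== Notes on version B (the rewrite author's own statement) =====
-- stated objective: alternative
-- what changed: A fills two Counters with sliding-window updates inside one nested loop; B first materialises the flat list of all n-gram windows and counts it with a single Counter(iterable) call, then derives context_counts in a separate pass over ngram_counts.items() by adding each n-gram's count to its (n-1)-prefix.
-- outside the precondition, e.g. on build_ngram_counts([['a']], 0): A returns ({(): 3}, {(): 2, ('a',): 1}), B returns ({(): 3}, {(): 3})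
import Mathlib
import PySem

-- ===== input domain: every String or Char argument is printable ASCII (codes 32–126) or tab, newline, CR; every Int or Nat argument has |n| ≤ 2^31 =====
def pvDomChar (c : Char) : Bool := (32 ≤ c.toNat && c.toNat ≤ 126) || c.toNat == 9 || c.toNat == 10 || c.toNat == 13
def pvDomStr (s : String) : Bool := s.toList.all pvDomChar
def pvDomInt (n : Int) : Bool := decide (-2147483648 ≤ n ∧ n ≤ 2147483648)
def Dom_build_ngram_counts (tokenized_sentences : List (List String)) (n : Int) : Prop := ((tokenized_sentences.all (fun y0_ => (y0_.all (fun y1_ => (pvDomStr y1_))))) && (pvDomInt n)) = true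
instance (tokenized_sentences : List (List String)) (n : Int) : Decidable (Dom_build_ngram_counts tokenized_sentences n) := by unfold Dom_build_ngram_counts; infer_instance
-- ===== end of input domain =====

-- B materialises the flat n-gram window stream, counts it with one Counter(iterable) call,
-- and derives context_counts by a second pass summing n-gram counts over their (n-1)-prefix;
-- same cost as A, a different (staged-pipeline) decomposition.


-- ===== PORT A =====
-- pad_sentence: ["<s>"] * (n - 1) + tokens + ["</s>"]  (Python's list*k is empty for k ≤ 0, as is toNat)
def pad_sentence (tokens : List String) (n : Int) : List String :=
  List.replicate (n - 1).toNat "<s>" ++ tokens ++ ["</s>"]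

def build_ngram_counts (tokenized_sentences : List (List String)) (n : Int) :
    (List (List String × Int)) × (List (List String × Int)) :=
  let st := tokenized_sentences.foldl (fun st sentence =>
    let padded := pad_sentence sentence n
    (PySem.List.pyRange 0 ((padded.length : Int) - n + 1) 1).foldl (fun st i =>
      let ngram := PySem.List.slice padded (some i) (some (i + n))
      let context := PySem.List.slice padded (some i) (some (i + n - 1))
      (st.1.modify ngram 0 (· + 1), st.2.modify context 0 (· + 1))) st)
    ((PySem.Dict.empty : PySem.Dict (List String) Int), (PySem.Dict.empty : PySem.Dict (List String) Int))
  (st.1.items, st.2.items)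

-- ===== PORT B =====
def build_ngram_counts_alt (tokenized_sentences : List (List String)) (n : Int) :
    (List (List String × Int)) × (List (List String × Int)) :=
  -- the flat comprehension of all windows (p[i:i+n] over every padded sentence)
  let windows := (tokenized_sentences.map (fun s => pad_sentence s n)).flatMap (fun p =>
    (PySem.List.pyRange 0 ((p.length : Int) - n + 1) 1).map
      (fun i => PySem.List.slice p (some i) (some (i + n))))
  let ngram_counts := PySem.Dict.counter windows
  -- ng[:-1] is List.dropLast (exact: tuple[:-1] drops the last element; empty stays empty)
  let context_counts := ngram_counts.items.foldl
    (fun d p => d.modify p.1.dropLast 0 (· + p.2))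
    (PySem.Dict.empty : PySem.Dict (List String) Int)
  (ngram_counts.items, context_counts.items)

-- ===== PRECONDITION & SPEC =====
-- Pre_ restricts to the n-gram model's natural domain n ≥ 1: for n ≤ 0 (no valid n-gram order)
-- A's window slices hit Python negative-index wraparound and return accidental values.
def Pre_build_ngram_counts (tokenized_sentences : List (List String)) (n : Int) : Prop := 1 ≤ n
instance (tokenized_sentences : List (List String)) (n : Int) : Decidable (Pre_build_ngram_counts tokenized_sentences n) := by unfold Pre_build_ngram_counts; infer_instance

def pvWitness_build_ngram_counts : List (List String) × Int := ([["the", "cat"], ["a", "cat"]], 2)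

def Spec_build_ngram_counts (tokenized_sentences : List (List String)) (n : Int) (out : (List (List String × Int)) × (List (List String × Int))) : Prop := out = build_ngram_counts_alt tokenized_sentences n
instance (tokenized_sentences : List (List String)) (n : Int) (out : (List (List String × Int)) × (List (List String × Int))) : Decidable (Spec_build_ngram_counts tokenized_sentences n out) := by unfold Spec_build_ngram_counts; infer_instance

-- ===== CLAIM (what is proved, stated in full; the proofs are below) =====
def Claim_equal_build_ngram_counts : Prop := ∀ (tokenized_sentences : List (List String)) (n : Int), Dom_build_ngram_counts tokenized_sentences n → Pre_build_ngram_counts tokenized_sentences n → Spec_build_ngram_counts tokenized_sentences n (build_ngram_counts tokenized_sentences n)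

-- ===== LEMMAS AND PROOFS =====

-- helper abbreviations for the proofs
def pvMod (d : PySem.Dict (List String) Int) (g : List String) : PySem.Dict (List String) Int :=
  d.modify g 0 (· + 1)

def pvWins (n : Int) (s : List String) : List (List String) :=
  (PySem.List.pyRange 0 (((pad_sentence s n).length : Int) - n + 1) 1).map
    (fun i => PySem.List.slice (pad_sentence s n) (some i) (some (i + n)))

def pvW (n : Int) (ts : List (List String)) : List (List String) := ts.flatMap (pvWins n)

-- the (n-1)-context window is the n-gram window minus its last element (in-range, n ≥ 1)
lemma slice_context (xs : List String) (i n : Int) (hn : 1 ≤ n) (h0 : 0 ≤ i)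
    (h2 : i < (xs.length : Int) - n + 1) :
    PySem.List.slice xs (some i) (some (i + n - 1)) =
      (PySem.List.slice xs (some i) (some (i + n))).dropLast := by
  rw [PySem.List.slice_toNat xs h0 (by omega), PySem.List.slice_toNat xs h0 (by omega)]
  have hk1 : (i + n - 1).toNat - i.toNat = n.toNat - 1 := by omega
  have hk2 : (i + n).toNat - i.toNat = n.toNat := by omega
  rw [hk1, hk2]
  have hlen : n.toNat ≤ (xs.drop i.toNat).length := by
    simp only [List.length_drop]; omega
  rcases lt_or_eq_of_le hlen with hlt | heq
  · rw [List.dropLast_take hlt]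
  · rw [heq, List.take_length, List.dropLast_eq_take]

-- A's nested pair-of-Counters loop, split into two plain folds over the n-gram stream
lemma a_run (n : Int) (hn : 1 ≤ n) (ts : List (List String))
    (d1 d2 : PySem.Dict (List String) Int) :
    ts.foldl (fun st sentence =>
        let padded := pad_sentence sentence n
        (PySem.List.pyRange 0 ((padded.length : Int) - n + 1) 1).foldl (fun st i =>
          let ngram := PySem.List.slice padded (some i) (some (i + n))
          let context := PySem.List.slice padded (some i) (some (i + n - 1))
          (st.1.modify ngram 0 (· + 1), st.2.modify context 0 (· + 1))) st) (d1, d2)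
      = ((pvW n ts).foldl pvMod d1, (((pvW n ts).map List.dropLast).foldl pvMod d2)) := by
  induction ts generalizing d1 d2 with
  | nil => simp [pvW]
  | cons s ts ih =>
    have hsent :
        (PySem.List.pyRange 0 (((pad_sentence s n).length : Int) - n + 1) 1).foldl (fun st i =>
            (st.1.modify (PySem.List.slice (pad_sentence s n) (some i) (some (i + n))) 0 (· + 1),
             st.2.modify (PySem.List.slice (pad_sentence s n) (some i) (some (i + n - 1))) 0 (· + 1)))
          (d1, d2)
        = ((pvWins n s).foldl pvMod d1, ((pvWins n s).map List.dropLast).foldl pvMod d2) := by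
      rw [PySem.List.foldl_prod_mk
        (fun (d : PySem.Dict (List String) Int) (i : Int) =>
          d.modify (PySem.List.slice (pad_sentence s n) (some i) (some (i + n))) 0 (· + 1))
        (fun (d : PySem.Dict (List String) Int) (i : Int) =>
          d.modify (PySem.List.slice (pad_sentence s n) (some i) (some (i + n - 1))) 0 (· + 1))]
      simp only [Prod.mk.injEq]
      constructor
      · simp [pvWins, List.foldl_map, pvMod]
      · rw [PySem.List.foldl_congr_mem _ _
          (fun d i => d.modify ((PySem.List.slice (pad_sentence s n) (some i) (some (i + n))).dropLast) 0 (· + 1)) _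
          (by
            intro acc i hi
            rw [PySem.List.mem_pyRange_one] at hi
            rw [slice_context _ i n hn hi.1 hi.2])]
        simp [pvWins, List.map_map, List.foldl_map, pvMod, Function.comp]
    simp only [List.foldl_cons, hsent]
    rw [ih]
    simp [pvW, List.foldl_append, List.map_append]

-- weighted increments: getD of the derivation fold is the weight-sum over matching keys
lemma getD_derive (l : List (List String × Int)) (d : PySem.Dict (List String) Int) (c : List String) :
    (l.foldl (fun d p => d.modify p.1.dropLast 0 (· + p.2)) d).getD c 0
      = d.getD c 0 + ((l.filter (fun p => p.1.dropLast == c)).map (·.2)).sum := by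
  induction l generalizing d with
  | nil => simp
  | cons p l ih =>
    simp only [List.foldl_cons, ih, List.filter_cons]
    rw [PySem.Dict.getD_modify]
    by_cases h : p.1.dropLast = c
    · simp [h]; ring
    · simp [h, Ne.symm h]

-- dedup commutes with a map of the deduped list
lemma ofList_map_ofList {α : Type} [BEq α] [LawfulBEq α] (f : α → α) (gs : List α) :
    PySem.Set.ofList ((PySem.Set.ofList gs).map f) = PySem.Set.ofList (gs.map f) := by
  induction gs using List.reverseRecOn with
  | nil => rfl
  | append_singleton gs x ih =>
    rw [PySem.Set.ofList_append_singleton, PySem.Set.add_eq_ite]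
    by_cases h : x ∈ PySem.Set.ofList gs
    · have hx : f x ∈ gs.map f := List.mem_map_of_mem ((PySem.Set.mem_ofList _ _).1 h)
      simp only [h, if_true, ih, List.map_append, List.map_singleton,
        PySem.Set.ofList_append_singleton]
      rw [PySem.Set.add_of_mem (by rw [PySem.Set.mem_ofList]; exact hx)]
    · simp only [h, if_false, List.map_append, List.map_singleton,
        PySem.Set.ofList_append_singleton, ih]

-- summing n-gram counts over the distinct keys with a given prefix counts the prefixed stream
lemma sum_counts (gs : List (List String)) (c : List String) :
    ((((PySem.Set.ofList gs).filter (fun k => k.dropLast == c)).map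
        (fun k => ((gs.count k : Nat) : Int))).sum)
      = (((gs.map List.dropLast).count c : Nat) : Int) := by
  have hperm : (PySem.Set.ofList gs).Perm gs.dedup :=
    (List.perm_ext_iff_of_nodup (PySem.Set.nodup_ofList gs) gs.nodup_dedup).2
      (fun a => by rw [PySem.Set.mem_ofList, List.mem_dedup])
  have hpf : (((PySem.Set.ofList gs).filter (fun k => k.dropLast == c)).map
        (fun k => (gs.count k : Nat))).Perm
      (((gs.dedup.filter (fun k => k.dropLast == c))).map (fun k => (gs.count k : Nat))) :=
    (hperm.filter _).map _
  have hsum := List.sum_map_count_dedup_filter_eq_countP (fun k => k.dropLast == c) gs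
  have hcount : (gs.map List.dropLast).count c = gs.countP (fun k => k.dropLast == c) := by
    rw [List.count, List.countP_map]; rfl
  have hcast : ∀ (l : List (List String)),
      ((l.map (fun k => ((gs.count k : Nat) : Int))).sum)
        = (((l.map (fun k => (gs.count k : Nat))).sum : Nat) : Int) := by
    intro l; induction l with
    | nil => simp
    | cons a l ih => simp [ih]
  have hcnt : ∀ k : List String,
      (@List.count (List String) instBEqOfDecidableEq k gs) = List.count k gs := by
    intro k
    simp only [List.count_eq_countP]
    apply List.countP_congr
    intro x _
    by_cases h : x = k <;> simp [h]
  simp only [hcnt] at hsum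
  rw [hcast, hpf.sum_eq]
  exact_mod_cast hsum.trans hcount.symm

-- deriving contexts from the n-gram Counter equals counting the prefixed stream directly
lemma derive_counter (gs : List (List String)) :
    PySem.Dict.counter (gs.map List.dropLast)
      = (PySem.Dict.counter gs).items.foldl
          (fun d p => d.modify p.1.dropLast 0 (· + p.2)) PySem.Dict.empty := by
  apply PySem.Dict.ext
  have hkeys : ((PySem.Dict.counter gs).items.foldl
      (fun d p => d.modify p.1.dropLast 0 (· + p.2)) PySem.Dict.empty).keys
      = PySem.Set.ofList (gs.map List.dropLast) := by
    have hk := PySem.Dict.keys_foldl_modify_key (κ := List String) (ν := Int)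
      (β := (List String × Int)) ((PySem.Dict.counter gs).items)
      (fun p => p.1.dropLast) 0 (fun _ p v => v + p.2) PySem.Dict.empty
    rw [hk]
    rw [PySem.Dict.keys_empty, PySem.Set.update_nil_left]
    rw [PySem.Dict.items_counter, List.map_map]
    have : ((fun p : (List String) × Int => p.1.dropLast) ∘ fun k => (k, ((gs.count k : Nat) : Int)))
        = List.dropLast := rfl
    rw [this, ofList_map_ofList]
  have hnodup : ((PySem.Dict.counter gs).items.foldl
      (fun d p => d.modify p.1.dropLast 0 (· + p.2)) PySem.Dict.empty).keys.Nodup := by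
    exact PySem.Dict.nodup_keys_foldl_modify_key ((PySem.Dict.counter gs).items)
      (fun p => p.1.dropLast) 0 (fun _ p v => v + p.2) PySem.Dict.empty
      (by simp [PySem.Dict.keys_empty])
  rw [PySem.Dict.items_eq_map_keys _ hnodup 0, hkeys, PySem.Dict.items_counter]
  apply List.map_congr_left
  intro c hc
  congr 1
  rw [getD_derive, PySem.Dict.getD_empty, PySem.Dict.items_counter]
  rw [List.filter_map, List.map_map]
  have : ((fun p : (List String) × Int => p.2) ∘ fun k => (k, ((gs.count k : Nat) : Int)))
      = fun k => ((gs.count k : Nat) : Int) := rfl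
  rw [this]
  have hfc : ((fun p : (List String) × Int => p.1.dropLast == c) ∘ fun k => (k, ((gs.count k : Nat) : Int)))
      = fun k => k.dropLast == c := rfl
  rw [hfc, sum_counts, zero_add]

-- B's comprehension over the mapped padded sentences is exactly the stream pvW
lemma b_windows (n : Int) (ts : List (List String)) :
    (ts.map (fun s => pad_sentence s n)).flatMap (fun p =>
        (PySem.List.pyRange 0 ((p.length : Int) - n + 1) 1).map
          (fun i => PySem.List.slice p (some i) (some (i + n))))
      = pvW n ts := by
  rw [List.flatMap_map]
  rfl

-- ===== VERDICT (by name: the statement is the Claim_ definition above) =====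
theorem build_ngram_counts_spec : Claim_equal_build_ngram_counts := by
  intro ts n hdom hpre
  unfold Spec_build_ngram_counts
  have hn : 1 ≤ n := hpre
  unfold build_ngram_counts build_ngram_counts_alt
  simp only [b_windows]
  rw [a_run n hn ts PySem.Dict.empty PySem.Dict.empty]
  have hW : (pvW n ts).foldl pvMod PySem.Dict.empty = PySem.Dict.counter (pvW n ts) := by
    rw [PySem.Dict.counter_eq_foldl]; rfl
  have hC : ((pvW n ts).map List.dropLast).foldl pvMod PySem.Dict.empty
      = PySem.Dict.counter ((pvW n ts).map List.dropLast) := by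
    rw [PySem.Dict.counter_eq_foldl]; rfl
  rw [hW, hC, derive_counter]
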